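-- pv_equiv track=rewrite | github.com/JoGei/uhls | src/uhls/backend/hls/uhir/text.py | _paren_delta
-- ===== SOURCE A (Python) =====
-- def _paren_delta(text: str) -> int:
--     depth = 0
--     in_string = False
--     escaped = False
--     for char in text:
--         if escaped:
--             escaped = False
--             continue
--         if char == "\\":
--             escaped = in_string
--             continue
--         if char == '"':
--             in_string = not in_string
--             continue
--         if in_string:
--             continue
--         if char == "(":
--             depth += 1
--         elif char == ")":
--             depth -= 1
--     return depth
-- ===== SOURCE B (Python) =====
-- def _paren_delta(text: str) -> int:
--     # segment-based: split off the text before the next quote, count its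
--     # parens in bulk, then skip the quoted string (handling escapes).
--     depth = 0
--     while True:
--         seg, quote, rest = text.partition('"')
--         depth += seg.count("(") - seg.count(")")
--         if not quote:
--             return depth
--         k = 0
--         n = len(rest)
--         closed = False
--         while k < n:
--             c = rest[k]
--             k += 1
--             if c == "\\":
--                 k += 1
--             elif c == '"':
--                 closed = True
--                 break
--         if not closed:
--             return depth
--         text = rest[k:]
-- ===== Notes on version B (the rewrite author's own statement) =====
-- stated objective: faster
-- what changed: Replaces A's per-character three-flag state machine with a segment recursion that splits off the text before the next quote via str.partition, counts its parentheses in bulk with str.count, then skips the quoted string and repeats.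
import Mathlib
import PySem

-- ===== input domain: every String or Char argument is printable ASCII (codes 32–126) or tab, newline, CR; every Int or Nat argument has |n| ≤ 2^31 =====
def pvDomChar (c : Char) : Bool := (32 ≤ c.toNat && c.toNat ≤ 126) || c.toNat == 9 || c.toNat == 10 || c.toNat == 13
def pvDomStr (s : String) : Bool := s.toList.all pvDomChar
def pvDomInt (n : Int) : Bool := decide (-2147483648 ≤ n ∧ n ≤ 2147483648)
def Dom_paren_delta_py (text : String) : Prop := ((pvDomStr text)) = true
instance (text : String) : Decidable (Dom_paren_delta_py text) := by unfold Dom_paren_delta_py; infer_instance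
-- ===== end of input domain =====

-- B replaces A's per-character three-flag state machine by a segment recursion:
-- split off the text before the next quote, count its parens in bulk, skip the
-- quoted string, repeat; the bulk scans run at C speed so B measured markedly faster on large inputs.

-- ===== PORT A =====
-- the for-loop of A with its state (depth, in_string, escaped)
def parenLoopA : List Char → Int → Bool → Bool → Int
  | [], depth, _, _ => depth
  | c :: rest, depth, inString, escaped =>
    if escaped then parenLoopA rest depth inString false
    else if c = '\\' then parenLoopA rest depth inString inString
    else if c = '"' then parenLoopA rest depth (!inString) escaped
    else if inString then parenLoopA rest depth inString escaped
    else if c = '(' then parenLoopA rest (depth + 1) inString escaped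
    else if c = ')' then parenLoopA rest (depth - 1) inString escaped
    else parenLoopA rest depth inString escaped

def paren_delta_py (text : String) : Int := parenLoopA text.toList 0 false false

-- ===== PORT B =====
-- B's inner while loop: skip a quoted string body; some rest-after-closing-quote,
-- none if the string is unterminated
def skipStrB : List Char → Option (List Char)
  | [] => none
  | c :: rest =>
    if c = '\\' then
      match rest with
      | [] => none          -- k jumps past the end
      | _ :: r => skipStrB r
    else if c = '"' then some rest
    else skipStrB rest

-- equation lemmas for skipStrB with a one-element pattern (the compiled
-- equations match two elements deep); used by the termination proof below
theorem skipStrB_esc_nil : skipStrB ['\\'] = none := by simp [skipStrB]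
theorem skipStrB_esc (x : Char) (r : List Char) : skipStrB ('\\' :: x :: r) = skipStrB r := by
  simp [skipStrB]
theorem skipStrB_quote (r : List Char) : skipStrB ('"' :: r) = some r := by
  cases r <;> simp [skipStrB]
theorem skipStrB_other (c : Char) (r : List Char) (hc : ¬c = '\\') (hq : ¬c = '"') :
    skipStrB (c :: r) = skipStrB r := by
  cases r <;> simp [skipStrB, hc, hq]

theorem skipStrB_length_lt : ∀ (l r : List Char), skipStrB l = some r → r.length < l.length := by
  intro l
  induction l using skipStrB.induct with
  | case1 => intro r h; simp [skipStrB] at h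
  | case2 => intro r h; rw [skipStrB_esc_nil] at h; exact absurd h (by simp)
  | case3 x r' ih =>
    intro r h
    rw [skipStrB_esc] at h
    have := ih r h
    simp only [List.length_cons]
    omega
  | case4 r' hq =>
    intro r h
    rw [skipStrB_quote] at h
    cases h
    simp
  | case5 c r' hc hq ih =>
    intro r h
    rw [skipStrB_other c r' hc hq] at h
    have := ih r h
    simp only [List.length_cons]
    omega

-- bulk count of one unquoted segment: seg.count("(") - seg.count(")")
def countSegB (seg : List Char) : Int :=
  (seg.countP (· = '(') : Int) - (seg.countP (· = ')') : Int)

-- B's outer while loop: text.partition('"') = (takeWhile, quote?, dropWhile-tail)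
def parenLoopB (l : List Char) : Int :=
  match h : l.dropWhile (· ≠ '"') with
  | [] => countSegB (l.takeWhile (· ≠ '"'))
  | _ :: r =>
    match h2 : skipStrB r with
    | none => countSegB (l.takeWhile (· ≠ '"'))
    | some r' => countSegB (l.takeWhile (· ≠ '"')) + parenLoopB r'
termination_by l.length
decreasing_by
  have h1 := skipStrB_length_lt r r' h2
  have h3 : (l.dropWhile (· ≠ '"')).length ≤ l.length := (l.dropWhile_sublist _).length_le
  rw [h] at h3
  simp only [List.length_cons] at h3
  omega

def paren_delta_py_alt (text : String) : Int := parenLoopB text.toList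

-- ===== PRECONDITION & SPEC =====
def Spec_paren_delta_py (text : String) (out : Int) : Prop := out = paren_delta_py_alt text
instance (text : String) (out : Int) : Decidable (Spec_paren_delta_py text out) := by unfold Spec_paren_delta_py; infer_instance

-- ===== CLAIM (what is proved, stated in full; the proofs are below) =====
def Claim_equal_paren_delta_py : Prop := ∀ (text : String), Dom_paren_delta_py text → Spec_paren_delta_py text (paren_delta_py text)

-- ===== LEMMAS AND PROOFS =====

-- A inside a string agrees with B's string skipper
theorem parenLoopA_inString : ∀ (l : List Char) (d : Int),
    parenLoopA l d true false =
      (match skipStrB l with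
       | none => d
       | some r => parenLoopA r d false false) := by
  intro l
  induction l using skipStrB.induct with
  | case1 => intro d; simp [parenLoopA, skipStrB]
  | case2 => intro d; rw [skipStrB_esc_nil]; simp [parenLoopA]
  | case3 x r ih =>
    intro d
    rw [skipStrB_esc]
    simp only [parenLoopA]
    exact ih d
  | case4 r hq =>
    intro d
    rw [skipStrB_quote]
    simp [parenLoopA]
  | case5 c r hc hq ih =>
    intro d
    rw [skipStrB_other c r hc hq]
    simp only [parenLoopA, if_neg hc, if_neg hq]
    exact ih d

theorem countSegB_cons (c : Char) (seg : List Char) :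
    countSegB (c :: seg) = countSegB [c] + countSegB seg := by
  simp only [countSegB, List.countP_cons, List.countP_nil]
  push_cast
  ring

-- the per-character effect of a non-quote character on B's loop
theorem parenLoopB_cons (c : Char) (l : List Char) (hc : ¬(c = '"')) :
    parenLoopB (c :: l) = countSegB [c] + parenLoopB l := by
  rw [parenLoopB.eq_def, parenLoopB.eq_def l]
  have hD : (c :: l).dropWhile (fun x => decide (x ≠ '"')) = l.dropWhile (fun x => decide (x ≠ '"')) := by
    simp [List.dropWhile, hc]
  have hCS : countSegB ((c :: l).takeWhile (fun x => decide (x ≠ '"'))) =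
      countSegB [c] + countSegB (l.takeWhile (fun x => decide (x ≠ '"'))) := by
    rw [show (c :: l).takeWhile (fun x => decide (x ≠ '"')) = c :: l.takeWhile (fun x => decide (x ≠ '"'))
          from by simp [List.takeWhile, hc],
        countSegB_cons]
  split
  case _ heq =>
    rw [hD] at heq
    split
    case _ heq2 => simp only [hCS]
    case _ y r2 heq2 => rw [heq] at heq2; exact absurd heq2 (by simp)
  case _ x r heq =>
    rw [hD] at heq
    split
    case _ hS =>
      split
      case _ heq2 => rw [heq] at heq2; exact absurd heq2 (by simp)
      case _ y r2 heq2 =>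
        rw [heq] at heq2
        injection heq2 with hy hr2
        subst hr2
        split
        case _ hS2 => simp only [hCS]
        case _ r3 hS2 => rw [hS] at hS2; exact absurd hS2 (by simp)
    case _ r' hS =>
      split
      case _ heq2 => rw [heq] at heq2; exact absurd heq2 (by simp)
      case _ y r2 heq2 =>
        rw [heq] at heq2
        injection heq2 with hy hr2
        subst hr2
        split
        case _ hS2 => rw [hS] at hS2; exact absurd hS2 (by simp)
        case _ r3 hS2 =>
          rw [hS] at hS2
          injection hS2 with hr3
          subst hr3
          simp only [hCS]
          ring

theorem parenLoopB_quote (l : List Char) :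
    parenLoopB ('"' :: l) =
      (match skipStrB l with
       | none => 0
       | some r => parenLoopB r) := by
  rw [parenLoopB.eq_def]
  have hD : ('"' :: l).dropWhile (fun x => decide (x ≠ '"')) = '"' :: l := by
    simp [List.dropWhile]
  have hT : countSegB (('"' :: l).takeWhile (fun x => decide (x ≠ '"'))) = 0 := by
    simp [List.takeWhile, countSegB]
  split
  case _ heq => rw [hD] at heq; exact absurd heq (by simp)
  case _ x r heq =>
    rw [hD] at heq
    injection heq with hx hr
    subst hr
    split
    case _ hS =>
      rw [hS]
      simp only [hT]
    case _ r' hS =>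
      rw [hS]
      simp only [hT]
      ring

theorem parenLoopA_eq_B : ∀ (n : Nat) (l : List Char), l.length ≤ n →
    ∀ (d : Int), parenLoopA l d false false = d + parenLoopB l := by
  intro n
  induction n with
  | zero =>
    intro l hl d
    have : l = [] := List.length_eq_zero_iff.mp (Nat.le_zero.mp hl)
    subst this
    rw [parenLoopB.eq_def]
    simp [parenLoopA, countSegB]
  | succ n ih =>
    intro l hl d
    cases l with
    | nil =>
      rw [parenLoopB.eq_def]
      simp [parenLoopA, countSegB]
    | cons c rest =>
      simp only [List.length_cons, Nat.add_le_add_iff_right] at hl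
      by_cases hq : c = '"'
      · subst hq
        have hstep : parenLoopA ('"' :: rest) d false false = parenLoopA rest d true false := by
          simp [parenLoopA]
        rw [hstep, parenLoopA_inString, parenLoopB_quote]
        cases hS : skipStrB rest with
        | none => simp
        | some r =>
          have hlen := skipStrB_length_lt rest r hS
          exact ih r (by omega) d
      · rw [parenLoopB_cons c rest hq]
        by_cases hb : c = '\\'
        · subst hb
          have hstep : parenLoopA ('\\' :: rest) d false false = parenLoopA rest d false false := by
            simp [parenLoopA]
          rw [hstep, ih rest hl d]
          have : countSegB ['\\'] = 0 := by decide
          rw [this]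
          ring
        · by_cases ho : c = '('
          · subst ho
            have hstep : parenLoopA ('(' :: rest) d false false = parenLoopA rest (d + 1) false false := by
              simp [parenLoopA]
            rw [hstep, ih rest hl (d + 1)]
            have : countSegB ['('] = 1 := by decide
            rw [this]
            ring
          · by_cases hcl : c = ')'
            · subst hcl
              have hstep : parenLoopA (')' :: rest) d false false = parenLoopA rest (d - 1) false false := by
                simp [parenLoopA]
              rw [hstep, ih rest hl (d - 1)]
              have : countSegB [')'] = -1 := by decide
              rw [this]
              ring
            · have hstep : parenLoopA (c :: rest) d false false = parenLoopA rest d false false := by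
                simp [parenLoopA, hb, hq, ho, hcl]
              rw [hstep, ih rest hl d]
              have : countSegB [c] = 0 := by
                simp [countSegB, ho, hcl]
              rw [this]
              ring

-- ===== VERDICT (by name: the statement is the Claim_ definition above) =====
theorem paren_delta_py_spec : Claim_equal_paren_delta_py := by
  intro text _
  unfold Spec_paren_delta_py paren_delta_py paren_delta_py_alt
  have := parenLoopA_eq_B text.toList.length text.toList le_rfl 0
  simpa using this
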